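-- pv_equiv track=rewrite | github.com/dhruvjwc24/TJHSST-AI-2023-2024 | Blocks/blocks7.py | fillHoles
-- ===== SOURCE A (Python) =====
-- def fillHoles(state, choices):
--     # holes = []
--     # for r, row in enumerate(state):
--     #         if "." in row:
--     #             pos = (r, row.index("."))
--     #             choices[f"{r},{row.index('.')}"] = (1, 1)
--     myStr = "Decomposition: ["
--     insideContent = ""
--     for r, row in enumerate(state):
--         for c, col in enumerate(row):
--             if f"{r},{c}" in choices:
--                 insideContent += f"{choices[f'{r},{c}']} "
--     if len(insideContent) == 0: return "No decomposition"
--     return myStr + insideContent.strip() + "]"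
-- ===== SOURCE B (Python) =====
-- def fillHoles(state, choices):
--     pos = {}
--     for r, row in enumerate(state):
--         for c in range(len(row)):
--             pos[f"{r},{c}"] = (r, c)
--     entries = [(pos[k], v) for k, v in choices.items() if k in pos]
--     entries.sort(key=lambda e: e[0])
--     if not entries:
--         return "No decomposition"
--     return "Decomposition: [" + " ".join(str(v) for _, v in entries) + "]"
-- ===== Notes on version B (the rewrite author's own statement) =====
-- stated objective: alternative
-- what changed: Instead of probing the choices dict at every one of the R*C grid cells and concatenating into a string, B builds a cell-position index dict over the grid once, keeps the choices entries whose key is a grid cell, sorts them by position to recover scan order, and joins the formatted values.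
import Mathlib
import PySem

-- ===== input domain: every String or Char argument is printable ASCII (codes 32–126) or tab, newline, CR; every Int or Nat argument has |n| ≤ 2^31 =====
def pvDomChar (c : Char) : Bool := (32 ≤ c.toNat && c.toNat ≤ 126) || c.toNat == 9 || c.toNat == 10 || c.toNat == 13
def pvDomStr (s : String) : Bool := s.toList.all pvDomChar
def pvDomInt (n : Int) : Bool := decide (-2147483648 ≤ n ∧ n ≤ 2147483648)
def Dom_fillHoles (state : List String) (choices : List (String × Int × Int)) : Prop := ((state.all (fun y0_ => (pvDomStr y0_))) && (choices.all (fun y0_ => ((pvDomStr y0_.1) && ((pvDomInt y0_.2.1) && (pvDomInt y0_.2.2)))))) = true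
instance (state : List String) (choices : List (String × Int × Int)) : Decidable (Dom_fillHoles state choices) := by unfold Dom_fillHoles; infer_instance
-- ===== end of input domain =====

-- B inverts the lookup: instead of probing the choices dict at every grid cell, it builds a
-- position index for the grid cells once, keeps the choices entries whose key is a cell,
-- and sorts them into scan order (objective: alternative structure, same cost).

-- shared formatting helpers: Python's f"{r},{c}" and str((a, b))
def pvKeyS (r c : Int) : String :=
  String.ofList (PySem.Int.toChars r ++ ',' :: PySem.Int.toChars c)

def pvFmt (v : Int × Int) : List Char :=
  '(' :: (PySem.Int.toChars v.1 ++ ',' :: ' ' :: PySem.Int.toChars v.2 ++ [')'])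

-- ===== PORT A =====
def fillHoles (state : List String) (choices : List (String × Int × Int)) : String :=
  let d := PySem.Dict.ofList choices
  let insideContent : List Char :=
    (PySem.List.enumerate state 0).foldl (fun acc rr =>
      (PySem.List.enumerate rr.2.toList 0).foldl (fun acc2 cc =>
        let k := pvKeyS rr.1 cc.1
        if d.contains k then acc2 ++ pvFmt (d.getD k (0, 0)) ++ [' '] else acc2) acc) []
  if insideContent.length = 0 then "No decomposition"
  else String.ofList ("Decomposition: [".toList ++ PySem.Chars.strip insideContent ++ [']'])

-- ===== PORT B =====
def fillHoles_alt (state : List String) (choices : List (String × Int × Int)) : String :=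
  let pos : PySem.Dict String (Int × Int) :=
    (PySem.List.enumerate state 0).foldl (fun d rr =>
      (PySem.List.pyRange 0 (rr.2.toList.length : Int) 1).foldl (fun d2 c =>
        d2.insert (pvKeyS rr.1 c) (rr.1, c)) d) PySem.Dict.empty
  let entries : List ((Int × Int) × (Int × Int)) :=
    ((PySem.Dict.ofList choices).items.filter (fun kv => pos.contains kv.1)).map
      (fun kv => (pos.getD kv.1 (0, 0), kv.2))
  let es := PySem.List.sorted2 entries (fun e => e.1.1) (fun e => e.1.2)
  if es = [] then "No decomposition"
  else String.ofList ("Decomposition: [".toList ++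
        PySem.Chars.join [' '] (es.map (fun e => pvFmt e.2)) ++ [']'])

-- ===== PRECONDITION & SPEC =====
def Spec_fillHoles (state : List String) (choices : List (String × Int × Int)) (out : String) : Prop := out = fillHoles_alt state choices
instance (state : List String) (choices : List (String × Int × Int)) (out : String) : Decidable (Spec_fillHoles state choices out) := by unfold Spec_fillHoles; infer_instance

-- ===== CLAIM (what is proved, stated in full; the proofs are below) =====
def Claim_equal_fillHoles : Prop := ∀ (state : List String) (choices : List (String × Int × Int)), Dom_fillHoles state choices → Spec_fillHoles state choices (fillHoles state choices)

-- ===== LEMMAS AND PROOFS =====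

def pvDigs (m : Nat) : List Char :=
  if h : m / 10 = 0 then [Nat.digitChar (m % 10)]
  else pvDigs (m / 10) ++ [Nat.digitChar (m % 10)]
decreasing_by exact Nat.div_lt_self (by omega) (by omega)

theorem pvToDigitsCore_eq : ∀ (f m : Nat) (acc : List Char), m < f →
    Nat.toDigitsCore 10 f m acc = pvDigs m ++ acc := by
  intro f
  induction f with
  | zero => omega
  | succ f ih =>
    intro m acc hm
    rw [Nat.toDigitsCore]
    by_cases h : m / 10 = 0
    · simp [h, pvDigs]
    · rw [pvDigs]
      simp only [h, dite_false]
      rw [ih (m / 10) _ (by omega)]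
      simp

theorem pvToChars_natCast (m : Nat) : PySem.Int.toChars (↑m) = pvDigs m := by
  have : ¬ ((m:Int) < 0) := by omega
  simp [PySem.Int.toChars, Nat.toDigits, this]
  rw [pvToDigitsCore_eq (m+1) m [] (by omega)]
  simp

theorem pvDigitChar_lt10 (k : Nat) (hk : k < 10) :
    '0' ≤ Nat.digitChar k ∧ Nat.digitChar k ≤ '9' ∧ (Nat.digitChar k).toNat = 48 + k := by
  interval_cases k <;> exact ⟨by decide, by decide, by decide⟩

theorem pvDigs_digits {m : Nat} : ∀ ch ∈ pvDigs m, '0' ≤ ch ∧ ch ≤ '9' := by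
  induction m using pvDigs.induct with
  | case1 m h =>
    rw [pvDigs, dif_pos h]
    intro ch hch
    simp at hch
    subst hch
    exact ⟨(pvDigitChar_lt10 _ (by omega)).1, (pvDigitChar_lt10 _ (by omega)).2.1⟩
  | case2 m h ih =>
    rw [pvDigs, dif_neg h]
    intro ch hch
    rcases List.mem_append.1 hch with h1 | h1
    · exact ih ch h1
    · simp at h1; subst h1
      exact ⟨(pvDigitChar_lt10 _ (by omega)).1, (pvDigitChar_lt10 _ (by omega)).2.1⟩

def pvValI (cs : List Char) : Int := cs.foldl (fun a ch => 10 * a + ((ch.toNat : Int) - 48)) 0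

theorem pvValI_pvDigs (m : Nat) : pvValI (pvDigs m) = (m : Int) := by
  induction m using pvDigs.induct with
  | case1 m h =>
    rw [pvDigs, dif_pos h]
    simp [pvValI, (pvDigitChar_lt10 (m % 10) (by omega)).2.2]
    omega
  | case2 m h ih =>
    rw [pvDigs, dif_neg h]
    simp only [pvValI, List.foldl_append, List.foldl_cons, List.foldl_nil]
    rw [show (pvDigs (m/10)).foldl (fun a ch => 10 * a + ((ch.toNat : Int) - 48)) 0 = pvValI (pvDigs (m/10)) from rfl, ih]
    rw [(pvDigitChar_lt10 (m % 10) (by omega)).2.2]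
    omega

theorem pvDigs_inj {a b : Nat} (h : pvDigs a = pvDigs b) : a = b := by
  have := pvValI_pvDigs a
  rw [h, pvValI_pvDigs b] at this
  omega

theorem pvDigit_ne_comma {ch : Char} (h : '0' ≤ ch) : ch ≠ ',' := by
  intro he; subst he; exact absurd (Char.le_def.1 h) (by decide)

theorem comma_not_mem_pvDigs {m : Nat} : ',' ∉ pvDigs m := by
  intro h
  exact pvDigit_ne_comma (pvDigs_digits ',' h).1 rfl

theorem pvSingleton_prefix_iff {x : Char} {l : List Char} : [x] <+: l ↔ l.head? = some x := by
  constructor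
  · rintro ⟨t, rfl⟩; rfl
  · intro h
    cases l with
    | nil => simp at h
    | cons a t => simp at h; subst h; exact ⟨t, rfl⟩

theorem pvFind_comma (a b : List Char) (h : ',' ∉ a) :
    PySem.Chars.find (a ++ ',' :: b) [','] = (a.length : Int) := by
  set s := a ++ ',' :: b with hs
  have hin : [','] <:+: s := ⟨a, b, by simp [hs]⟩
  have h0 : 0 ≤ PySem.Chars.find s [','] := (PySem.Chars.find_nonneg_iff s [',']).2 hin
  obtain ⟨hpre, hmin⟩ := PySem.Chars.find_spec h0
  set k := (PySem.Chars.find s [',']).toNat with hk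
  have hle : k ≤ a.length := by
    by_contra hgt
    exact hmin a.length (by omega) (by
      rw [hs, List.drop_append_of_le_length le_rfl, List.drop_length]
      exact ⟨b, rfl⟩)
  have heq : k = a.length := by
    rcases Nat.lt_or_ge k a.length with hlt | hge
    · exfalso
      rw [hs, List.drop_append_of_le_length (le_of_lt hlt)] at hpre
      have := pvSingleton_prefix_iff.1 hpre
      have hh : (a.drop k).head? = some ',' := by
        cases hd : (a.drop k) with
        | nil => rw [List.drop_eq_nil_iff] at hd; omega
        | cons x t => rw [hd] at this; simp at this ⊢; exact this
      have hmem : ',' ∈ a.drop k := List.mem_of_mem_head? hh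
      exact h (List.mem_of_mem_drop hmem)
    · omega
  omega

theorem pvKeyS_toList (r c : Int) :
    (pvKeyS r c).toList = PySem.Int.toChars r ++ ',' :: PySem.Int.toChars c := by
  rw [pvKeyS, String.toList_ofList]

-- injectivity of the f"{r},{c}" encoding on non-negative coordinates
theorem pvKeyS_inj_nat {rn cn rn' cn' : Nat}
    (h : pvKeyS (↑rn) (↑cn) = pvKeyS (↑rn') (↑cn')) : rn = rn' ∧ cn = cn' := by
  have hl := congrArg String.toList h
  rw [pvKeyS_toList, pvKeyS_toList, pvToChars_natCast, pvToChars_natCast,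
      pvToChars_natCast, pvToChars_natCast] at hl
  have hf := pvFind_comma (pvDigs rn) (pvDigs cn) comma_not_mem_pvDigs
  rw [hl, pvFind_comma (pvDigs rn') (pvDigs cn') comma_not_mem_pvDigs] at hf
  have hlen : (pvDigs rn').length = (pvDigs rn).length := by omega
  obtain ⟨h1, h2⟩ := List.append_inj hl hlen.symm
  simp only [List.cons.injEq] at h2
  exact ⟨pvDigs_inj h1, pvDigs_inj h2.2⟩

theorem pvKeyS_inj {r c r' c' : Int} (hr : 0 ≤ r) (hc : 0 ≤ c) (hr' : 0 ≤ r') (hc' : 0 ≤ c')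
    (h : pvKeyS r c = pvKeyS r' c') : r = r' ∧ c = c' := by
  have h1 : ((r.toNat : Int)) = r := by omega
  have h2 : ((c.toNat : Int)) = c := by omega
  have h3 : ((r'.toNat : Int)) = r' := by omega
  have h4 : ((c'.toNat : Int)) = c' := by omega
  rw [← h1, ← h2, ← h3, ← h4] at h
  obtain ⟨ha, hb⟩ := pvKeyS_inj_nat h
  omega

theorem pvKeyS_row_inj {r : Int} {j k : Nat} (h : pvKeyS r (↑j) = pvKeyS r (↑k)) : j = k := by
  have hl := congrArg String.toList h
  rw [pvKeyS_toList, pvKeyS_toList, pvToChars_natCast, pvToChars_natCast] at hl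
  have := List.append_cancel_left hl
  simp only [List.cons.injEq] at this
  exact pvDigs_inj this.2

-- ---- the scan-order list of matched cells (shared reference object for both sides) ----

def pvCell (d : PySem.Dict String (Int × Int)) (r c : Int) : List ((Int × Int) × (Int × Int)) :=
  if d.contains (pvKeyS r c) then [((r, c), d.getD (pvKeyS r c) (0, 0))] else []

def pvRowL (d : PySem.Dict String (Int × Int)) (r : Int) :
    List Char → Int → List ((Int × Int) × (Int × Int))
  | [], _ => []
  | _ :: cs, c0 => pvCell d r c0 ++ pvRowL d r cs (c0 + 1)

def pvScan (d : PySem.Dict String (Int × Int)) :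
    List String → Int → List ((Int × Int) × (Int × Int))
  | [], _ => []
  | row :: rest, r0 => pvRowL d r0 row.toList 0 ++ pvScan d rest (r0 + 1)

theorem pvRowA (d : PySem.Dict String (Int × Int)) (r : Int) :
    ∀ (cs : List Char) (c0 : Int) (acc : List Char),
    (PySem.List.enumerate cs c0).foldl (fun acc2 cc =>
        if d.contains (pvKeyS r cc.1) then
          acc2 ++ pvFmt (d.getD (pvKeyS r cc.1) (0, 0)) ++ [' '] else acc2) acc
      = acc ++ (pvRowL d r cs c0).flatMap (fun e => pvFmt e.2 ++ [' ']) := by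
  intro cs
  induction cs with
  | nil => intro c0 acc; simp [pvRowL, PySem.List.enumerate_nil]
  | cons c t ih =>
    intro c0 acc
    rw [PySem.List.enumerate_cons, List.foldl_cons, ih, pvRowL]
    rw [pvCell]
    split <;> simp

theorem pvScanA (d : PySem.Dict String (Int × Int)) :
    ∀ (st : List String) (r0 : Int) (acc : List Char),
    (PySem.List.enumerate st r0).foldl (fun acc rr =>
      (PySem.List.enumerate rr.2.toList 0).foldl (fun acc2 cc =>
        if d.contains (pvKeyS rr.1 cc.1) then
          acc2 ++ pvFmt (d.getD (pvKeyS rr.1 cc.1) (0, 0)) ++ [' '] else acc2) acc) acc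
      = acc ++ (pvScan d st r0).flatMap (fun e => pvFmt e.2 ++ [' ']) := by
  intro st
  induction st with
  | nil => intro r0 acc; simp [pvScan, PySem.List.enumerate_nil]
  | cons row rest ih =>
    intro r0 acc
    rw [PySem.List.enumerate_cons, List.foldl_cons, ih, pvRowA, pvScan]
    simp

theorem mem_pvCell {d : PySem.Dict String (Int × Int)} {r c : Int} {e : (Int × Int) × (Int × Int)} :
    e ∈ pvCell d r c ↔ d.contains (pvKeyS r c) = true ∧
      e = ((r, c), d.getD (pvKeyS r c) (0, 0)) := by
  rw [pvCell]; split <;> simp_all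

theorem mem_pvRowL {d : PySem.Dict String (Int × Int)} {r : Int} {e : (Int × Int) × (Int × Int)} :
    ∀ (cs : List Char) (c0 : Int),
    (e ∈ pvRowL d r cs c0 ↔ ∃ j : Nat, j < cs.length ∧ e ∈ pvCell d r (c0 + j)) := by
  intro cs
  induction cs with
  | nil => intro c0; simp [pvRowL]
  | cons c t ih =>
    intro c0
    rw [pvRowL, List.mem_append, ih]
    constructor
    · rintro (h | ⟨j, hj, hm⟩)
      · exact ⟨0, by simp, by simpa using h⟩
      · exact ⟨j + 1, by simp at hj ⊢; omega, by rw [show c0 + ↑(j + 1) = c0 + 1 + ↑j by push_cast; ring]; exact hm⟩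
    · rintro ⟨j, hj, hm⟩
      cases j with
      | zero => left; simpa using hm
      | succ j => right; exact ⟨j, by simp at hj; omega, by rw [show c0 + 1 + (j:Int) = c0 + ↑(j+1) by push_cast; ring]; exact hm⟩

theorem mem_pvScan {d : PySem.Dict String (Int × Int)} {e : (Int × Int) × (Int × Int)} :
    ∀ (st : List String) (r0 : Int),
    (e ∈ pvScan d st r0 ↔ ∃ k : Nat, k < st.length ∧ e ∈ pvRowL d (r0 + k) (st.getD k "").toList 0) := by
  intro st
  induction st with
  | nil => intro r0; simp [pvScan]
  | cons row rest ih =>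
    intro r0
    rw [pvScan, List.mem_append, ih]
    constructor
    · rintro (h | ⟨k, hk, hm⟩)
      · exact ⟨0, by simp, by simpa using h⟩
      · exact ⟨k + 1, by simp at hk ⊢; omega, by rw [show r0 + ↑(k + 1) = r0 + 1 + ↑k by push_cast; ring]; simpa using hm⟩
    · rintro ⟨k, hk, hm⟩
      cases k with
      | zero => left; simpa using hm
      | succ k => right; exact ⟨k, by simp at hk; omega, by rw [show r0 + 1 + (k:Int) = r0 + ↑(k+1) by push_cast; ring]; simpa using hm⟩

def pvLtE (a b : (Int × Int) × (Int × Int)) : Prop :=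
  a.1.1 < b.1.1 ∨ (a.1.1 = b.1.1 ∧ a.1.2 < b.1.2)

theorem pairwise_pvRowL {d : PySem.Dict String (Int × Int)} {r : Int} :
    ∀ (cs : List Char) (c0 : Int), List.Pairwise pvLtE (pvRowL d r cs c0) := by
  intro cs
  induction cs with
  | nil => intro c0; simp [pvRowL]
  | cons c t ih =>
    intro c0
    rw [pvRowL, List.pairwise_append]
    refine ⟨?_, ih (c0 + 1), ?_⟩
    · rw [pvCell]; split <;> simp
    · intro x hx y hy
      obtain ⟨_, hx2⟩ := mem_pvCell.1 hx
      obtain ⟨j, _, hy2⟩ := (mem_pvRowL _ _).1 hy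
      obtain ⟨_, hy3⟩ := mem_pvCell.1 hy2
      right
      subst hx2 hy3
      exact ⟨rfl, by simp; omega⟩

theorem pairwise_pvScan {d : PySem.Dict String (Int × Int)} :
    ∀ (st : List String) (r0 : Int), List.Pairwise pvLtE (pvScan d st r0) := by
  intro st
  induction st with
  | nil => intro r0; simp [pvScan]
  | cons row rest ih =>
    intro r0
    rw [pvScan, List.pairwise_append]
    refine ⟨pairwise_pvRowL _ _, ih (r0 + 1), ?_⟩
    intro x hx y hy
    obtain ⟨j, _, hx2⟩ := (mem_pvRowL _ _).1 hx
    obtain ⟨_, hx3⟩ := mem_pvCell.1 hx2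
    obtain ⟨k, _, hy2⟩ := (mem_pvScan _ _).1 hy
    obtain ⟨j', _, hy3⟩ := (mem_pvRowL _ _).1 hy2
    obtain ⟨_, hy4⟩ := mem_pvCell.1 hy3
    left
    subst hx3 hy4
    simp
    omega

theorem pvLtE_irrefl (a : (Int × Int) × (Int × Int)) : ¬ pvLtE a a := by
  rw [pvLtE]; omega

theorem nodup_pvScan {d : PySem.Dict String (Int × Int)} (st : List String) (r0 : Int) :
    (pvScan d st r0).Nodup := by
  exact (pairwise_pvScan st r0).imp (fun h => by rintro rfl; exact pvLtE_irrefl _ h)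

-- ---- the position-index dict built by B ----

def pvRowIns (d : PySem.Dict String (Int × Int)) (r n : Int) : PySem.Dict String (Int × Int) :=
  (PySem.List.pyRange 0 n 1).foldl (fun d2 c => d2.insert (pvKeyS r c) (r, c)) d

def pvScanIns (d : PySem.Dict String (Int × Int)) :
    List String → Int → PySem.Dict String (Int × Int)
  | [], _ => d
  | row :: rest, r0 => pvScanIns (pvRowIns d r0 (row.toList.length : Int)) rest (r0 + 1)

theorem pvPos_eq (st : List String) : ∀ (r0 : Int) (d : PySem.Dict String (Int × Int)),
    (PySem.List.enumerate st r0).foldl (fun d rr =>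
      (PySem.List.pyRange 0 (rr.2.toList.length : Int) 1).foldl (fun d2 c =>
        d2.insert (pvKeyS rr.1 c) (rr.1, c)) d) d = pvScanIns d st r0 := by
  induction st with
  | nil => intro r0 d; simp [pvScanIns, PySem.List.enumerate_nil]
  | cons row rest ih =>
    intro r0 d
    rw [PySem.List.enumerate_cons, List.foldl_cons, ih, pvScanIns]
    rfl

theorem pvRowIns_succ (d : PySem.Dict String (Int × Int)) (r : Int) (n : Nat) :
    pvRowIns d r (↑(n + 1)) = (pvRowIns d r ↑n).insert (pvKeyS r ↑n) (r, ↑n) := by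
  rw [pvRowIns, pvRowIns, show ((↑(n + 1) : Int)) = (↑n + 1) by push_cast; ring,
      PySem.List.pyRange_one_succ_right (by omega), List.foldl_append]
  rfl

theorem pvRowIns_get?_hit (d : PySem.Dict String (Int × Int)) (r : Int) :
    ∀ (n j : Nat), j < n → (pvRowIns d r ↑n).get? (pvKeyS r ↑j) = some (r, ↑j) := by
  intro n
  induction n with
  | zero => omega
  | succ n ih =>
    intro j hj
    rw [pvRowIns_succ]
    by_cases h : j = n
    · subst h; exact PySem.Dict.get?_insert_self _ _ _
    · rw [PySem.Dict.get?_insert_of_ne _ _ (fun he => h (pvKeyS_row_inj he))]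
      exact ih j (by omega)

theorem pvRowIns_get?_miss (d : PySem.Dict String (Int × Int)) (r : Int) :
    ∀ (n : Nat) (k : String), (∀ j : Nat, j < n → k ≠ pvKeyS r ↑j) →
    (pvRowIns d r ↑n).get? k = d.get? k := by
  intro n
  induction n with
  | zero => intro k _; rw [pvRowIns]; simp
  | succ n ih =>
    intro k hk
    rw [pvRowIns_succ, PySem.Dict.get?_insert_of_ne _ _ (hk n (by omega))]
    exact ih k (fun j hj => hk j (by omega))

theorem pvRowIns_get?_inv (d : PySem.Dict String (Int × Int)) (r : Int) :
    ∀ (n : Nat) (k : String) (v : Int × Int), (pvRowIns d r ↑n).get? k = some v →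
    (∃ j : Nat, j < n ∧ k = pvKeyS r ↑j ∧ v = (r, ↑j)) ∨ d.get? k = some v := by
  intro n
  induction n with
  | zero => intro k v h; rw [pvRowIns] at h; right; simpa [PySem.List.pyRange_zero_nat] using h
  | succ n ih =>
    intro k v h
    rw [pvRowIns_succ, PySem.Dict.get?_insert] at h
    split at h
    · left
      rename_i he
      exact ⟨n, by omega, he, by simpa using h.symm⟩
    · rcases ih k v h with ⟨j, hj, hk, hv⟩ | hd
      · exact Or.inl ⟨j, by omega, hk, hv⟩
      · exact Or.inr hd

theorem pvScanIns_get?_miss :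
    ∀ (st : List String) (d : PySem.Dict String (Int × Int)) (r0 : Int) (k : String),
    (∀ (i j : Nat), i < st.length → j < (st.getD i "").toList.length → k ≠ pvKeyS (r0 + ↑i) ↑j) →
    (pvScanIns d st r0).get? k = d.get? k := by
  intro st
  induction st with
  | nil => intro d r0 k _; rfl
  | cons row rest ih =>
    intro d r0 k hk
    rw [pvScanIns, ih _ (r0 + 1) k (fun i j hi hj => by
      have := hk (i + 1) j (by simpa using Nat.succ_lt_succ hi) (by simpa using hj)
      rwa [show r0 + ↑(i + 1) = r0 + 1 + (i : Int) by push_cast; ring] at this)]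
    exact pvRowIns_get?_miss d r0 row.toList.length k (fun j hj => by
      have := hk 0 j (by simp) (by simpa using hj)
      simpa using this)

theorem pvScanIns_get?_hit :
    ∀ (st : List String) (d : PySem.Dict String (Int × Int)) (r0 : Int), 0 ≤ r0 →
    ∀ (i j : Nat), i < st.length → j < (st.getD i "").toList.length →
    (pvScanIns d st r0).get? (pvKeyS (r0 + ↑i) ↑j) = some (r0 + ↑i, ↑j) := by
  intro st
  induction st with
  | nil => intro d r0 _ i j hi _; simp at hi
  | cons row rest ih =>
    intro d r0 h0 i j hi hj
    cases i with
    | zero =>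
      simp only [Nat.cast_zero, add_zero] at *
      rw [pvScanIns, pvScanIns_get?_miss rest _ (r0 + 1) _ (fun i' j' hi' hj' heq => by
        have := pvKeyS_inj (by omega) (by omega) (by omega) (by omega) heq
        omega)]
      exact pvRowIns_get?_hit d r0 row.toList.length j (by simpa using hj)
    | succ i =>
      rw [pvScanIns, show r0 + ↑(i + 1) = r0 + 1 + (i : Int) by push_cast; ring]
      exact ih _ (r0 + 1) (by omega) i j (by simpa using hi) (by simpa using hj)

theorem pvScanIns_get?_inv :
    ∀ (st : List String) (d : PySem.Dict String (Int × Int)) (r0 : Int) (k : String) (v : Int × Int),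
    (pvScanIns d st r0).get? k = some v →
    (∃ i j : Nat, i < st.length ∧ j < (st.getD i "").toList.length ∧
      k = pvKeyS (r0 + ↑i) ↑j ∧ v = (r0 + ↑i, ↑j)) ∨ d.get? k = some v := by
  intro st
  induction st with
  | nil => intro d r0 k v h; exact Or.inr h
  | cons row rest ih =>
    intro d r0 k v h
    rw [pvScanIns] at h
    rcases ih _ (r0 + 1) k v h with ⟨i, j, hi, hj, hk, hv⟩ | hd
    · refine Or.inl ⟨i + 1, j, by simpa using Nat.succ_lt_succ hi, by simpa using hj, ?_, ?_⟩
      · rwa [show r0 + ↑(i + 1) = r0 + 1 + (i : Int) by push_cast; ring]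
      · rwa [show r0 + ↑(i + 1) = r0 + 1 + (i : Int) by push_cast; ring]
    · rcases pvRowIns_get?_inv d r0 row.toList.length k v hd with ⟨j, hj, hk, hv⟩ | hdd
      · exact Or.inl ⟨0, j, by simp, by simpa using hj, by simpa using hk, by simpa using hv⟩
      · exact Or.inr hdd

theorem pvPos_get?_iff {state : List String} {k : String} {v : Int × Int} :
    (pvScanIns PySem.Dict.empty state 0).get? k = some v ↔
    ∃ i j : Nat, i < state.length ∧ j < (state.getD i "").toList.length ∧
      k = pvKeyS ↑i ↑j ∧ v = (↑i, ↑j) := by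
  constructor
  · intro h
    rcases pvScanIns_get?_inv state PySem.Dict.empty 0 k v h with ⟨i, j, hi, hj, hk, hv⟩ | hd
    · exact ⟨i, j, hi, hj, by simpa using hk, by simpa using hv⟩
    · rw [PySem.Dict.get?_empty] at hd; cases hd
  · rintro ⟨i, j, hi, hj, rfl, rfl⟩
    have := pvScanIns_get?_hit state PySem.Dict.empty 0 (by omega) i j hi hj
    simpa using this

theorem mem_entries_iff {state : List String} {choices : List (String × Int × Int)}
    {e : (Int × Int) × (Int × Int)} :
    e ∈ (((PySem.Dict.ofList choices).items.filter
          (fun kv => (pvScanIns PySem.Dict.empty state 0).contains kv.1)).map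
          (fun kv => ((pvScanIns PySem.Dict.empty state 0).getD kv.1 (0, 0), kv.2)))
      ↔ e ∈ pvScan (PySem.Dict.ofList choices) state 0 := by
  have hnd := PySem.Dict.nodup_keys_ofList choices
  rw [List.mem_map, mem_pvScan]
  constructor
  · rintro ⟨kv, hkv, rfl⟩
    obtain ⟨k0, v0⟩ := kv
    rw [List.mem_filter] at hkv
    obtain ⟨hmem, hcont⟩ := hkv
    rw [PySem.Dict.contains_eq_isSome_get?, Option.isSome_iff_exists] at hcont
    obtain ⟨w, hw⟩ := hcont
    obtain ⟨i, j, hi, hj, hk, hv⟩ := pvPos_get?_iff.1 hw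
    refine ⟨i, hi, ?_⟩
    rw [mem_pvRowL]
    refine ⟨j, hj, ?_⟩
    rw [mem_pvCell]
    have hDg : (PySem.Dict.ofList choices).get? k0 = some v0 :=
      PySem.Dict.get?_of_mem_items _ hmem hnd
    dsimp only at hw hk ⊢
    constructor
    · rw [show (0 : Int) + ↑i = (↑i : Int) by ring, show (0 : Int) + ↑j = (↑j : Int) by ring,
        ← hk, PySem.Dict.contains_eq_isSome_get?, hDg]
      rfl
    · rw [show (0 : Int) + ↑i = (↑i : Int) by ring, show (0 : Int) + ↑j = (↑j : Int) by ring,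
        ← hk, PySem.Dict.getD_of_get?_eq_some _ _ hDg, PySem.Dict.getD_of_get?_eq_some _ _ hw, hv]
  · rintro ⟨i, hi, hrow⟩
    rw [mem_pvRowL] at hrow
    obtain ⟨j, hj, hcell⟩ := hrow
    rw [mem_pvCell] at hcell
    obtain ⟨hcont, he⟩ := hcell
    rw [show (0 : Int) + ↑i = (↑i : Int) by ring, show (0 : Int) + ↑j = (↑j : Int) by ring] at hcont he
    rw [PySem.Dict.contains_eq_isSome_get?, Option.isSome_iff_exists] at hcont
    obtain ⟨w, hw⟩ := hcont
    refine ⟨(pvKeyS ↑i ↑j, w), ?_, ?_⟩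
    · rw [List.mem_filter]
      refine ⟨PySem.Dict.mem_items_of_get?_eq_some _ hw, ?_⟩
      rw [PySem.Dict.contains_eq_isSome_get?,
        pvPos_get?_iff.2 ⟨i, j, hi, hj, rfl, rfl⟩]
      rfl
    · dsimp only
      rw [he, PySem.Dict.getD_of_get?_eq_some _ _ hw,
        PySem.Dict.getD_of_get?_eq_some _ _ (pvPos_get?_iff.2 ⟨i, j, hi, hj, rfl, rfl⟩)]

theorem nodup_entries {state : List String} {choices : List (String × Int × Int)} :
    (((PySem.Dict.ofList choices).items.filter
        (fun kv => (pvScanIns PySem.Dict.empty state 0).contains kv.1)).map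
        (fun kv => ((pvScanIns PySem.Dict.empty state 0).getD kv.1 (0, 0), kv.2))).Nodup := by
  have hnd := PySem.Dict.nodup_keys_ofList choices
  have hitems : (PySem.Dict.ofList choices).items.Nodup := by
    have : (PySem.Dict.ofList choices).keys = (PySem.Dict.ofList choices).items.map (·.1) := rfl
    rw [this] at hnd
    exact hnd.of_map
  refine List.Nodup.map_on ?_ (hitems.filter _)
  intro kv hkv kv' hkv' heq
  rw [List.mem_filter] at hkv hkv'
  obtain ⟨_, hc⟩ := hkv
  obtain ⟨_, hc'⟩ := hkv'
  rw [PySem.Dict.contains_eq_isSome_get?, Option.isSome_iff_exists] at hc hc'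
  obtain ⟨w, hw⟩ := hc
  obtain ⟨w', hw'⟩ := hc'
  obtain ⟨i, j, _, _, hk, hv⟩ := pvPos_get?_iff.1 hw
  obtain ⟨i', j', _, _, hk', hv'⟩ := pvPos_get?_iff.1 hw'
  have h1 : (pvScanIns PySem.Dict.empty state 0).getD kv.1 (0, 0) = w :=
    PySem.Dict.getD_of_get?_eq_some _ _ hw
  have h2 : (pvScanIns PySem.Dict.empty state 0).getD kv'.1 (0, 0) = w' :=
    PySem.Dict.getD_of_get?_eq_some _ _ hw'
  have hfst := congrArg Prod.fst heq
  have hsnd := congrArg Prod.snd heq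
  simp only [h1, h2] at hfst
  have hww : w = w' := hfst
  have hij : (↑i : Int) = ↑i' ∧ (↑j : Int) = ↑j' := by
    rw [hv, hv'] at hww
    exact ⟨congrArg Prod.fst hww, congrArg Prod.snd hww⟩
  have hkeq : kv.1 = kv'.1 := by
    rw [hk, hk', show (↑i : Int) = ↑i' from hij.1, show (↑j : Int) = ↑j' from hij.2]
  exact Prod.ext hkeq hsnd

theorem pvPerm {state : List String} {choices : List (String × Int × Int)} :
    (pvScan (PySem.Dict.ofList choices) state 0).Perm
      (((PySem.Dict.ofList choices).items.filter
          (fun kv => (pvScanIns PySem.Dict.empty state 0).contains kv.1)).map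
          (fun kv => ((pvScanIns PySem.Dict.empty state 0).getD kv.1 (0, 0), kv.2))) := by
  apply List.perm_of_nodup_nodup_toFinset_eq (nodup_pvScan _ _) nodup_entries
  ext x
  simp only [List.mem_toFinset]
  exact mem_entries_iff.symm

theorem pvSorted2_eq_sorted_lex (xs : List ((Int × Int) × (Int × Int))) :
    PySem.List.sorted2 xs (fun e => e.1.1) (fun e => e.1.2)
      = PySem.List.sorted xs (fun e => (toLex (e.1.1, e.1.2) : Lex (Int × Int))) := by
  rw [PySem.List.sorted2, PySem.List.sorted]
  have hb : (fun (a b : (Int × Int) × (Int × Int)) =>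
      decide (a.1.1 < b.1.1) || (!decide (b.1.1 < a.1.1) && decide (a.1.2 < b.1.2)))
    = (fun (a b : (Int × Int) × (Int × Int)) =>
      decide ((toLex (a.1.1, a.1.2) : Lex (Int × Int)) < toLex (b.1.1, b.1.2))) := by
    funext a b
    by_cases h : (toLex (a.1.1, a.1.2) : Lex (Int × Int)) < toLex (b.1.1, b.1.2)
    · rw [decide_eq_true h]
      rw [Prod.Lex.lt_iff] at h
      simp at h ⊢
      omega
    · rw [decide_eq_false h]
      rw [Prod.Lex.lt_iff] at h
      simp at h ⊢
      omega
  rw [hb]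

theorem pvSorted2_eq_of_perm {xs ys : List ((Int × Int) × (Int × Int))}
    (hperm : ys.Perm xs) (hpw : List.Pairwise pvLtE ys) :
    PySem.List.sorted2 xs (fun e => e.1.1) (fun e => e.1.2) = ys := by
  rw [pvSorted2_eq_sorted_lex]
  apply PySem.List.sorted_eq_of_perm_of_pairwise_lt _ _ _ hperm
  apply hpw.imp
  intro a b hab
  rw [Prod.Lex.lt_iff]
  rcases hab with h | ⟨h1, h2⟩
  · exact Or.inl h
  · exact Or.inr ⟨h1, h2⟩

theorem pvFlat_eq_join : ∀ (S : List ((Int × Int) × (Int × Int))), S ≠ [] →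
    S.flatMap (fun e => pvFmt e.2 ++ [' '])
      = PySem.Chars.join [' '] (S.map fun e => pvFmt e.2) ++ [' '] := by
  intro S
  induction S with
  | nil => intro h; exact absurd rfl h
  | cons x t ih =>
    intro _
    cases t with
    | nil => simp [PySem.Chars.join_singleton]
    | cons y u =>
      rw [List.flatMap_cons, ih (by simp)]
      simp only [List.map_cons]
      rw [PySem.Chars.join_cons_cons]
      simp

theorem pvFmt_getLast? (v : Int × Int) : (pvFmt v).getLast? = some ')' := by
  have h : pvFmt v = ('(' :: PySem.Int.toChars v.1 ++ ',' :: ' ' :: PySem.Int.toChars v.2) ++ [')'] := by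
    simp [pvFmt]
  rw [h, List.getLast?_concat]

theorem pvJoin_head (S : List ((Int × Int) × (Int × Int))) (h : S ≠ []) :
    ∃ t, PySem.Chars.join [' '] (S.map fun e => pvFmt e.2) = '(' :: t := by
  cases S with
  | nil => exact absurd rfl h
  | cons x u =>
    cases u with
    | nil => exact ⟨_, by rw [List.map_cons, List.map_nil, PySem.Chars.join_singleton, pvFmt]⟩
    | cons y w =>
      simp only [List.map_cons]
      rw [PySem.Chars.join_cons_cons, pvFmt]
      exact ⟨_, rfl⟩

theorem pvJoin_getLast? : ∀ (S : List ((Int × Int) × (Int × Int))), S ≠ [] →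
    (PySem.Chars.join [' '] (S.map fun e => pvFmt e.2)).getLast? = some ')' := by
  intro S
  induction S with
  | nil => intro h; exact absurd rfl h
  | cons x t ih =>
    intro _
    cases t with
    | nil => rw [List.map_cons, List.map_nil, PySem.Chars.join_singleton, pvFmt_getLast?]
    | cons y u =>
      simp only [List.map_cons]
      rw [PySem.Chars.join_cons_cons, List.getLast?_append, List.getLast?_append]
      have := ih (by simp)
      simp only [List.map_cons] at this
      rw [this]
      rfl

theorem pvStrip_concat_space (X : List Char) (hh : ∃ t, X = '(' :: t)
    (hl : X.getLast? = some ')') :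
    PySem.Chars.strip (X ++ [' ']) = X := by
  obtain ⟨t, rfl⟩ := hh
  rw [PySem.Chars.strip, PySem.Chars.lstrip]
  rw [List.cons_append, List.dropWhile_cons]
  rw [show PySem.Chars.isspace '(' = false from rfl]
  simp only [Bool.false_eq_true, if_false]
  rw [PySem.Chars.rstrip]
  rw [show ('(' :: (t ++ [' '])).reverse = ' ' :: ('(' :: t).reverse by simp]
  rw [List.dropWhile_cons]
  rw [show PySem.Chars.isspace ' ' = true from rfl]
  simp only [if_true]
  have hrev : ('(' :: t).reverse.head? = some ')' := by
    rw [List.head?_reverse]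
    exact hl
  cases hr : ('(' :: t).reverse with
  | nil => simp [hr] at hrev
  | cons a b =>
    rw [hr] at hrev
    simp only [List.head?_cons, Option.some.injEq] at hrev
    subst hrev
    rw [List.dropWhile_cons]
    rw [show PySem.Chars.isspace ')' = false from rfl]
    simp only [Bool.false_eq_true, if_false]
    rw [← hr, List.reverse_reverse]

theorem pvMain (state : List String) (choices : List (String × Int × Int)) :
    fillHoles state choices = fillHoles_alt state choices := by
  rw [fillHoles, fillHoles_alt]
  simp only []
  rw [pvScanA, pvPos_eq, List.nil_append]
  rw [pvSorted2_eq_of_perm pvPerm (pairwise_pvScan state 0)]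
  cases hS : pvScan (PySem.Dict.ofList choices) state 0 with
  | nil => simp
  | cons x t =>
    rw [pvFlat_eq_join _ (by simp)]
    rw [if_neg (by simp)]
    rw [if_neg (by simp)]
    congr 1
    rw [pvStrip_concat_space _ (pvJoin_head _ (by simp)) (pvJoin_getLast? _ (by simp))]

-- ===== VERDICT (by name: the statement is the Claim_ definition above) =====
theorem fillHoles_spec : Claim_equal_fillHoles := by
  intro state choices _
  unfold Spec_fillHoles
  exact pvMain state choices
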